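-- pv_equiv track=rewrite | github.com/anuraggupta29/lte-mac-pusch-header-decoder | conversion_modules/word_to_byteHex.py | wordToByteHex
-- ===== SOURCE A (Python) =====
-- def wordToByteHex(integer_string):
--     integer_string = integer_string.replace(",", " ")
--     integer_array = integer_string.split()
--     hex_result_array = []
--
--     for integer_s in integer_array:
--         integer = int(integer_s)
--         #         byte1     byte2    byte3    byte4
--         # bit     31-24     23-16    15-8     7-0
--         byte1 = (integer & 0xFF000000) >> 24
--         byte2 = (integer & 0x00FF0000) >> 16
--         byte3 = (integer & 0x0000FF00) >> 8
--         byte4 = (integer & 0x000000FF)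
--
--         byte_hex1 = f"{byte1:02x}"
--         byte_hex2 = f"{byte2:02x}"
--         byte_hex3 = f"{byte3:02x}"
--         byte_hex4 = f"{byte4:02x}"
--
--         hex_result_array.append(byte_hex1)
--         hex_result_array.append(byte_hex2)
--         hex_result_array.append(byte_hex3)
--         hex_result_array.append(byte_hex4)
--
--     hex_result_string = " ".join(hex_result_array)
--     return hex_result_string
-- ===== SOURCE B (Python) =====
-- def wordToByteHex(integer_string):
--     digits = "".join(format(int(t) % 0x100000000, "08x")
--                      for t in integer_string.replace(",", " ").split())
--     return " ".join(digits[i:i+2] for i in range(0, len(digits), 2))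
-- ===== Notes on version B (the rewrite author's own statement) =====
-- stated objective: idiomatic
-- what changed: A extracts four bytes per integer with separate 32-bit masks and shifts and appends four tokens per loop; B formats each integer once (mod 2^32) as an 8-digit hex string, concatenates all digits into one stream, then in a second pass chunks that stream into 2-character pairs and joins them.
import Mathlib
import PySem

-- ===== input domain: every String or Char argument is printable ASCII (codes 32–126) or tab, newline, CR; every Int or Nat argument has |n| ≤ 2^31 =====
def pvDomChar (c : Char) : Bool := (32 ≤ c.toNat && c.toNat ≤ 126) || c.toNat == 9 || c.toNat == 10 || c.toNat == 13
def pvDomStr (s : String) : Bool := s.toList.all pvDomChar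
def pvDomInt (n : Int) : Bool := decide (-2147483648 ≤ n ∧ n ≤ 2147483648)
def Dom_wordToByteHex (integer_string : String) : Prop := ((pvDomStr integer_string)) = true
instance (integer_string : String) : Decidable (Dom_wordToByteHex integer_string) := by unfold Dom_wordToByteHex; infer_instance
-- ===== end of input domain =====

-- B replaces A's per-byte mask-and-shift extraction by formatting each integer once (mod 2^32) as an
-- 8-digit hex string and then, in a second pass, chunking the concatenated digit stream into 2-char
-- pairs (objective: idiomatic two-stage decomposition).

-- hex digit character for 0 ≤ n < 16 (shared rendering primitive of both formats)
def hexDigit (n : Nat) : Char := if n < 10 then Char.ofNat (48 + n) else Char.ofNat (87 + n)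
-- f"{b:02x}" — exact for 0 ≤ b < 256, the only values A formats
def fmt02x (b : Int) : String := String.ofList [hexDigit (b.toNat / 16), hexDigit (b.toNat % 16)]

-- ===== PORT A =====
def wordToByteHex (integer_string : String) : String :=
  let integer_string := PySem.Str.replace integer_string "," " "
  let integer_array := PySem.Str.split₀ integer_string
  let hex_result_array := integer_array.foldl (fun acc integer_s =>
    let integer := (PySem.Int.ofStr? integer_s).getD 0   -- Pre_ excludes the ValueError (none) case
    let byte1 := (PySem.Int.band integer 0xFF000000) >>> (24:Nat)
    let byte2 := (PySem.Int.band integer 0x00FF0000) >>> (16:Nat)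
    let byte3 := (PySem.Int.band integer 0x0000FF00) >>> (8:Nat)
    let byte4 := PySem.Int.band integer 0x000000FF
    acc ++ [fmt02x byte1] ++ [fmt02x byte2] ++ [fmt02x byte3] ++ [fmt02x byte4]) []
  PySem.Str.join " " hex_result_array

-- ===== PORT B =====
-- format(v, "08x") — exact for 0 ≤ v < 2^32, the only values B formats (v is taken mod 2^32)
def hex8 (v : Int) : List Char :=
  [hexDigit (v.toNat / 268435456 % 16), hexDigit (v.toNat / 16777216 % 16),
   hexDigit (v.toNat / 1048576 % 16), hexDigit (v.toNat / 65536 % 16),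
   hexDigit (v.toNat / 4096 % 16), hexDigit (v.toNat / 256 % 16),
   hexDigit (v.toNat / 16 % 16), hexDigit (v.toNat % 16)]

-- "digits[i:i+2] for i in range(0, len(digits), 2)" — the 2-char chunking pass
def chunk2 : List Char → List String
  | [] => []
  | [a] => [String.ofList [a]]
  | a :: b :: rest => String.ofList [a, b] :: chunk2 rest

def wordToByteHex_alt (integer_string : String) : String :=
  let digits := ((PySem.Str.split₀ (PySem.Str.replace integer_string "," " ")).map
    (fun t => hex8 (PySem.Int.mod ((PySem.Int.ofStr? t).getD 0) 0x100000000))).flatten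
      -- Pre_ excludes the ValueError (none) case of int(t)
  PySem.Str.join " " (chunk2 digits)

-- ===== PRECONDITION & SPEC =====
-- Pre_: every whitespace/comma-separated token parses as a Python int (else A raises ValueError)
def Pre_wordToByteHex (integer_string : String) : Prop :=
  ∀ tok ∈ PySem.Str.split₀ (PySem.Str.replace integer_string "," " "),
    (PySem.Int.ofStr? tok).isSome = true
instance (integer_string : String) : Decidable (Pre_wordToByteHex integer_string) := by
  unfold Pre_wordToByteHex; infer_instance

def pvWitness_wordToByteHex : String := "16909060, -1 4096"

def Spec_wordToByteHex (integer_string : String) (out : String) : Prop := out = wordToByteHex_alt integer_string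
instance (integer_string : String) (out : String) : Decidable (Spec_wordToByteHex integer_string out) := by unfold Spec_wordToByteHex; infer_instance

-- ===== CLAIM (what is proved, stated in full; the proofs are below) =====
def Claim_equal_wordToByteHex : Prop := ∀ (integer_string : String), Dom_wordToByteHex integer_string → Pre_wordToByteHex integer_string → Spec_wordToByteHex integer_string (wordToByteHex integer_string)

-- ===== LEMMAS AND PROOFS =====

-- a &&& 0xFF…(byte at bit l)…00 isolates one byte: arithmetic form
theorem and_byte_mask (a l : Nat) : a &&& (255 <<< l) = a / 2 ^ l % 256 * 2 ^ l := by
  set x := a &&& (255 <<< l) with hx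
  have hmask : (255 <<< l) &&& (2 ^ l - 1) = 0 := by
    have := Nat.and_two_pow_sub_one_eq_mod (255 <<< l) l
    simp only [Nat.shiftLeft_eq, Nat.mul_mod_left] at this
    simp [Nat.shiftLeft_eq]
  have hlow : x % 2 ^ l = 0 := by
    have := Nat.and_two_pow_sub_one_eq_mod x l
    rw [← this, hx, Nat.and_assoc, hmask, Nat.and_zero]
  have hhigh : x >>> l = a >>> l &&& 255 := by
    rw [hx, Nat.shiftRight_and_distrib]
    congr 1
    rw [Nat.shiftLeft_eq, Nat.shiftRight_eq_div_pow, Nat.mul_div_cancel _ (by positivity)]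
  have h255 : a >>> l &&& 255 = a >>> l % 256 := by
    have := Nat.and_two_pow_sub_one_eq_mod (a >>> l) 8; simpa using this
  have hdiv : x / 2 ^ l = a / 2 ^ l % 256 := by
    rw [← Nat.shiftRight_eq_div_pow, hhigh, h255, Nat.shiftRight_eq_div_pow]
  rw [← hdiv, Nat.div_mul_cancel (Nat.dvd_of_mod_eq_zero hlow)]

-- A's byte1 as a byte of n mod 2^32
theorem byte1_eq (n : Int) :
    (PySem.Int.band n 0xFF000000) >>> (24:Nat) =
      (((PySem.Int.mod n 0x100000000).toNat / 16777216 % 256 : Nat) : Int) := by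
  rw [PySem.Int.mod_eq_emod_of_pos (a := n) (by norm_num)]
  rcases (by omega : 0 ≤ n ∨ n < 0) with hn | hn
  · rw [PySem.Int.band_of_nonneg hn (by norm_num)]
    have hm : ((0xFF000000:Int)).toNat = 255 <<< 24 := by decide
    rw [hm, and_byte_mask, ← Int.natCast_shiftRight, Nat.shiftRight_eq_div_pow,
        Nat.mul_div_cancel _ (by norm_num)]
    omega
  · have h0 : ¬ (0 ≤ n) := by omega
    simp only [PySem.Int.band]
    rw [if_neg h0, if_pos (by norm_num)]
    have hm : ((0xFF000000:Int)).toNat = 255 <<< 24 := by decide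
    rw [hm, Nat.and_comm, and_byte_mask]
    rw [← Int.natCast_shiftRight, Nat.shiftRight_eq_div_pow]
    have h2 : (255 <<< 24 - (-n-1).toNat / 2 ^ 24 % 256 * 2 ^ 24) / 2 ^ 24
        = 255 - (-n-1).toNat / 2 ^ 24 % 256 := by
      have h3 : (255:Nat) <<< 24 = 255 * 2 ^ 24 := by decide
      rw [h3, ← Nat.sub_mul, Nat.mul_div_cancel _ (by norm_num)]
    rw [h2]
    omega

-- A's byte2 as a byte of n mod 2^32
theorem byte2_eq (n : Int) :
    (PySem.Int.band n 0x00FF0000) >>> (16:Nat) =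
      (((PySem.Int.mod n 0x100000000).toNat / 65536 % 256 : Nat) : Int) := by
  rw [PySem.Int.mod_eq_emod_of_pos (a := n) (by norm_num)]
  rcases (by omega : 0 ≤ n ∨ n < 0) with hn | hn
  · rw [PySem.Int.band_of_nonneg hn (by norm_num)]
    have hm : ((0x00FF0000:Int)).toNat = 255 <<< 16 := by decide
    rw [hm, and_byte_mask, ← Int.natCast_shiftRight, Nat.shiftRight_eq_div_pow,
        Nat.mul_div_cancel _ (by norm_num)]
    omega
  · have h0 : ¬ (0 ≤ n) := by omega
    simp only [PySem.Int.band]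
    rw [if_neg h0, if_pos (by norm_num)]
    have hm : ((0x00FF0000:Int)).toNat = 255 <<< 16 := by decide
    rw [hm, Nat.and_comm, and_byte_mask]
    rw [← Int.natCast_shiftRight, Nat.shiftRight_eq_div_pow]
    have h2 : (255 <<< 16 - (-n-1).toNat / 2 ^ 16 % 256 * 2 ^ 16) / 2 ^ 16
        = 255 - (-n-1).toNat / 2 ^ 16 % 256 := by
      have h3 : (255:Nat) <<< 16 = 255 * 2 ^ 16 := by decide
      rw [h3, ← Nat.sub_mul, Nat.mul_div_cancel _ (by norm_num)]
    rw [h2]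
    omega

-- A's byte3 as a byte of n mod 2^32
theorem byte3_eq (n : Int) :
    (PySem.Int.band n 0x0000FF00) >>> (8:Nat) =
      (((PySem.Int.mod n 0x100000000).toNat / 256 % 256 : Nat) : Int) := by
  rw [PySem.Int.mod_eq_emod_of_pos (a := n) (by norm_num)]
  rcases (by omega : 0 ≤ n ∨ n < 0) with hn | hn
  · rw [PySem.Int.band_of_nonneg hn (by norm_num)]
    have hm : ((0x0000FF00:Int)).toNat = 255 <<< 8 := by decide
    rw [hm, and_byte_mask, ← Int.natCast_shiftRight, Nat.shiftRight_eq_div_pow,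
        Nat.mul_div_cancel _ (by norm_num)]
    omega
  · have h0 : ¬ (0 ≤ n) := by omega
    simp only [PySem.Int.band]
    rw [if_neg h0, if_pos (by norm_num)]
    have hm : ((0x0000FF00:Int)).toNat = 255 <<< 8 := by decide
    rw [hm, Nat.and_comm, and_byte_mask]
    rw [← Int.natCast_shiftRight, Nat.shiftRight_eq_div_pow]
    have h2 : (255 <<< 8 - (-n-1).toNat / 2 ^ 8 % 256 * 2 ^ 8) / 2 ^ 8
        = 255 - (-n-1).toNat / 2 ^ 8 % 256 := by
      have h3 : (255:Nat) <<< 8 = 255 * 2 ^ 8 := by decide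
      rw [h3, ← Nat.sub_mul, Nat.mul_div_cancel _ (by norm_num)]
    rw [h2]
    omega

-- A's byte4 as a byte of n mod 2^32
theorem byte4_eq (n : Int) :
    PySem.Int.band n 0x000000FF = (((PySem.Int.mod n 0x100000000).toNat % 256 : Nat) : Int) := by
  rw [PySem.Int.mod_eq_emod_of_pos (a := n) (by norm_num)]
  rcases (by omega : 0 ≤ n ∨ n < 0) with hn | hn
  · rw [PySem.Int.band_of_nonneg hn (by norm_num)]
    have hm : ((0x000000FF:Int)).toNat = 255 := by decide
    rw [hm]
    have := Nat.and_two_pow_sub_one_eq_mod n.toNat 8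
    simp only [show (2:Nat) ^ 8 - 1 = 255 by norm_num] at this
    rw [this]
    omega
  · have h0 : ¬ (0 ≤ n) := by omega
    simp only [PySem.Int.band]
    rw [if_neg h0, if_pos (by norm_num)]
    have hm : ((0x000000FF:Int)).toNat = 255 := by decide
    rw [hm]
    have := Nat.and_two_pow_sub_one_eq_mod (-n-1).toNat 8
    simp only [show (2:Nat) ^ 8 - 1 = 255 by norm_num] at this
    rw [Nat.and_comm, this]
    omega

-- per token: chunking this token's 8 hex digits yields A's 4 formatted bytes, then the rest
theorem token_chunk (n : Int) (rest : List Char) :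
    chunk2 (hex8 (PySem.Int.mod n 0x100000000) ++ rest) =
      [fmt02x ((PySem.Int.band n 0xFF000000) >>> (24:Nat)),
       fmt02x ((PySem.Int.band n 0x00FF0000) >>> (16:Nat)),
       fmt02x ((PySem.Int.band n 0x0000FF00) >>> (8:Nat)),
       fmt02x (PySem.Int.band n 0x000000FF)] ++ chunk2 rest := by
  rw [byte1_eq, byte2_eq, byte3_eq, byte4_eq]
  set m := (PySem.Int.mod n 0x100000000).toNat with hm
  have e1 : m / 16777216 % 256 / 16 = m / 268435456 % 16 := by omega
  have e2 : m / 16777216 % 256 % 16 = m / 16777216 % 16 := by omega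
  have e3 : m / 65536 % 256 / 16 = m / 1048576 % 16 := by omega
  have e4 : m / 65536 % 256 % 16 = m / 65536 % 16 := by omega
  have e5 : m / 256 % 256 / 16 = m / 4096 % 16 := by omega
  have e6 : m / 256 % 256 % 16 = m / 256 % 16 := by omega
  have e7 : m % 256 / 16 = m / 16 % 16 := by omega
  have e8 : m % 256 % 16 = m % 16 := by omega
  simp only [hex8, fmt02x, Int.toNat_natCast, List.cons_append, List.nil_append, chunk2,
    e1, e2, e3, e4, e5, e6, e7, e8]
  rw [hm]

-- A's fold = chunking B's concatenated digit stream
theorem folds_eq (toks : List String) (acc : List String) :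
    toks.foldl (fun acc integer_s =>
      let integer := (PySem.Int.ofStr? integer_s).getD 0
      let byte1 := (PySem.Int.band integer 0xFF000000) >>> (24:Nat)
      let byte2 := (PySem.Int.band integer 0x00FF0000) >>> (16:Nat)
      let byte3 := (PySem.Int.band integer 0x0000FF00) >>> (8:Nat)
      let byte4 := PySem.Int.band integer 0x000000FF
      acc ++ [fmt02x byte1] ++ [fmt02x byte2] ++ [fmt02x byte3] ++ [fmt02x byte4]) acc =
    acc ++ chunk2 ((toks.map
      (fun t => hex8 (PySem.Int.mod ((PySem.Int.ofStr? t).getD 0) 0x100000000))).flatten) := by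
  induction toks generalizing acc with
  | nil => simp [chunk2]
  | cons t ts ih =>
      simp only [List.foldl_cons, List.map_cons, List.flatten_cons]
      rw [ih, token_chunk]
      simp [List.append_assoc]

-- ===== VERDICT (by name: the statement is the Claim_ definition above) =====
theorem wordToByteHex_spec : Claim_equal_wordToByteHex := by
  intro s _hd _hp
  unfold Spec_wordToByteHex wordToByteHex wordToByteHex_alt
  simp only [folds_eq, List.nil_append]
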